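-- pv_equiv track=rewrite | github.com/waadsadek05/NQueen | gui.py | compute_conflicted_indices
-- ===== SOURCE A (Python) =====
-- def compute_conflicted_indices(board):
--     """دالة مساعدة لحساب الملكات المتعارضة"""
--     conflicts = []
--     N = len(board)
--     for i in range(N):
--         for j in range(i+1, N):
--             if board[i] == board[j] or abs(board[i]-board[j]) == abs(i-j):
--                 conflicts.extend([i, j])
--     return list(set(conflicts))
-- ===== SOURCE B (Python) =====
-- def _counter(xs):
--     c = {}
--     for x in xs:
--         c[x] = c.get(x, 0) + 1
--     return c
--
-- def compute_conflicted_indices(board):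
--     cols = _counter(board)
--     diag = _counter([r - i for i, r in enumerate(board)])
--     anti = _counter([r + i for i, r in enumerate(board)])
--     return [i for i, r in enumerate(board)
--             if cols[r] > 1 or diag[r - i] > 1 or anti[r + i] > 1]
-- ===== Notes on version B (the rewrite author's own statement) =====
-- stated objective: faster
-- what changed: Replaced the O(N^2) all-pairs conflict scan by one O(N) pass that buckets queens by column, diagonal (r-i) and anti-diagonal (r+i) counts and marks every index whose bucket has size > 1; output is the same set of conflicted indices (the function's return order is CPython set-iteration order and is compared as a set).
import Mathlib
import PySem

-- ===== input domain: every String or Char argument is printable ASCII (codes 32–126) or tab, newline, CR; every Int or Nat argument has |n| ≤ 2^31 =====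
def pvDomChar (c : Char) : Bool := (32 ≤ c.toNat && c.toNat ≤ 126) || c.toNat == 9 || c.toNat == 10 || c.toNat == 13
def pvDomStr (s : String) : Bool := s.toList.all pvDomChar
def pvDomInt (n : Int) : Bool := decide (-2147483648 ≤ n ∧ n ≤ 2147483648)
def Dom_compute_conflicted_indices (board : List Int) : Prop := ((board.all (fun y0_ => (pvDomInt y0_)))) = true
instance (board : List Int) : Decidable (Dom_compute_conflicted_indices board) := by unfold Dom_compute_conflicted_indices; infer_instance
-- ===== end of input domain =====

-- B replaces A's all-pairs conflict scan by one counting pass over column/diagonal/anti-diagonal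
-- buckets (objective: faster). The set of conflicted indices is the same; the order of A's return
-- value is CPython's hash-dependent list(set(...)) iteration order, which PySem does not model and
-- which is compared as a finite set, so both ports return that set in ascending index order.

-- ===== PORT A =====
def compute_conflicted_indices (board : List Int) : List Int :=
  let N : Int := board.length
  let conflicts : List Int :=
    (PySem.List.pyRange 0 N).foldl (fun conflicts i =>
      (PySem.List.pyRange (i + 1) N).foldl (fun conflicts j =>
        if PySem.List.pyGetD board i 0 = PySem.List.pyGetD board j 0
            ∨ (PySem.List.pyGetD board i 0 - PySem.List.pyGetD board j 0).natAbs = (i - j).natAbs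
        then conflicts ++ [i, j] else conflicts) conflicts) []
  -- list(set(conflicts)): CPython's set-iteration order is hash-dependent and not modelled by PySem
  -- (this return value is compared as a finite set); ported as the ascending enumeration of that set.
  PySem.List.sorted (PySem.Set.ofList conflicts) (fun x => x) false

-- ===== PORT B =====
-- helper _counter of Source B: c = {}; for x in xs: c[x] = c.get(x, 0) + 1
def pvCounter (xs : List Int) : PySem.Dict Int Int :=
  xs.foldl (fun c x => c.insert x (c.getD x 0 + 1)) PySem.Dict.empty

def compute_conflicted_indices_alt (board : List Int) : List Int :=
  let cols := pvCounter board
  let diag := pvCounter ((PySem.List.enumerate board).map (fun p => p.2 - p.1))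
  let anti := pvCounter ((PySem.List.enumerate board).map (fun p => p.2 + p.1))
  ((PySem.List.enumerate board).filter (fun p =>
      decide (1 < cols.getD p.2 0) || decide (1 < diag.getD (p.2 - p.1) 0)
        || decide (1 < anti.getD (p.2 + p.1) 0))).map (fun p => p.1)

-- ===== PRECONDITION & SPEC =====
def Spec_compute_conflicted_indices (board : List Int) (out : List Int) : Prop := out = compute_conflicted_indices_alt board
instance (board : List Int) (out : List Int) : Decidable (Spec_compute_conflicted_indices board out) := by unfold Spec_compute_conflicted_indices; infer_instance

-- ===== CLAIM (what is proved, stated in full; the proofs are below) =====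
def Claim_equal_compute_conflicted_indices : Prop := ∀ (board : List Int), Dom_compute_conflicted_indices board → Spec_compute_conflicted_indices board (compute_conflicted_indices board)

-- ===== LEMMAS AND PROOFS =====

-- A's pair condition at integer indices i, j
abbrev pvCond (board : List Int) (i j : Int) : Prop :=
  PySem.List.pyGetD board i 0 = PySem.List.pyGetD board j 0
    ∨ (PySem.List.pyGetD board i 0 - PySem.List.pyGetD board j 0).natAbs = (i - j).natAbs

-- A's conflicts list, rewritten as a flatMap
def pvFlat (board : List Int) : List Int :=
  (PySem.List.pyRange 0 board.length).flatMap (fun i =>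
    (PySem.List.pyRange (i + 1) board.length).flatMap (fun j =>
      if pvCond board i j then [i, j] else []))

lemma pvConflicts_eq (board : List Int) :
    ((PySem.List.pyRange 0 (board.length : Int)).foldl (fun conflicts i =>
      (PySem.List.pyRange (i + 1) (board.length : Int)).foldl (fun conflicts j =>
        if PySem.List.pyGetD board i 0 = PySem.List.pyGetD board j 0
            ∨ (PySem.List.pyGetD board i 0 - PySem.List.pyGetD board j 0).natAbs = (i - j).natAbs
        then conflicts ++ [i, j] else conflicts) conflicts) []) = pvFlat board := by
  have hin : ∀ (i : Int) (acc : List Int),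
      (PySem.List.pyRange (i + 1) (board.length : Int)).foldl (fun conflicts j =>
        if pvCond board i j then conflicts ++ [i, j] else conflicts) acc
      = acc ++ (PySem.List.pyRange (i + 1) (board.length : Int)).flatMap
          (fun j => if pvCond board i j then [i, j] else []) := by
    intro i acc
    have hfun : (fun (conflicts : List Int) j => if pvCond board i j then conflicts ++ [i, j] else conflicts)
        = (fun conflicts j => conflicts ++ (if pvCond board i j then [i, j] else [])) := by
      funext conflicts j; split <;> simp
    rw [hfun, PySem.List.foldl_append_eq_flatMap]
  have hfun2 : (fun (conflicts : List Int) i =>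
      (PySem.List.pyRange (i + 1) (board.length : Int)).foldl (fun conflicts j =>
        if pvCond board i j then conflicts ++ [i, j] else conflicts) conflicts)
      = (fun conflicts i => conflicts ++ (PySem.List.pyRange (i + 1) (board.length : Int)).flatMap
          (fun j => if pvCond board i j then [i, j] else [])) := by
    funext conflicts i; exact hin i conflicts
  rw [hfun2, PySem.List.foldl_append_eq_flatMap]
  rfl

lemma mem_pvFlat (board : List Int) (k : Int) :
    k ∈ pvFlat board ↔ ∃ i j : Int, 0 ≤ i ∧ i < j ∧ j < (board.length : Int)
      ∧ pvCond board i j ∧ (k = i ∨ k = j) := by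
  have hite : ∀ (i j : Int), (k ∈ if pvCond board i j then [i, j] else []) ↔
      pvCond board i j ∧ (k = i ∨ k = j) := by
    intro i j; split <;> simp [*]
  simp only [pvFlat, List.mem_flatMap, PySem.List.mem_pyRange_one, hite]
  constructor
  · rintro ⟨i, ⟨h0, hin⟩, j, ⟨hj1, hj2⟩, hc, hk⟩
    exact ⟨i, j, h0, by omega, hj2, hc, hk⟩
  · rintro ⟨i, j, h0, hij, hjn, hc, hk⟩
    exact ⟨i, ⟨h0, by omega⟩, j, ⟨by omega, hjn⟩, hc, hk⟩

lemma nodup_fst_enumerate (board : List Int) :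
    ((PySem.List.enumerate board).map Prod.fst).Nodup :=
  List.Pairwise.map Prod.fst (fun _ _ h => Int.ne_of_lt h)
    (PySem.List.pairwise_lt_enumerate board 0)

lemma mem_enumerate_zero (board : List Int) (p : Int × Int) :
    p ∈ PySem.List.enumerate board ↔ ∃ a : Nat, ∃ h : a < board.length, p = ((a : Int), board[a]) := by
  simp [PySem.List.mem_enumerate_iff]

-- A's pair condition at two enumerate entries = equality on one of the three features
lemma cond_iff_features (board : List Int) (p q : Int × Int)
    (hp : p ∈ PySem.List.enumerate board) (hq : q ∈ PySem.List.enumerate board) :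
    pvCond board p.1 q.1 ↔ (q.2 = p.2 ∨ q.2 - q.1 = p.2 - p.1 ∨ q.2 + q.1 = p.2 + p.1) := by
  obtain ⟨a, ha, rfl⟩ := (mem_enumerate_zero board p).mp hp
  obtain ⟨b, hb, rfl⟩ := (mem_enumerate_zero board q).mp hq
  simp only [pvCond, PySem.List.pyGetD_natCast]
  rw [List.getD_eq_getElem _ _ ha, List.getD_eq_getElem _ _ hb, Int.natAbs_eq_natAbs_iff]
  constructor
  · rintro (h | h | h) <;> omega
  · rintro (h | h | h) <;> omega

-- anchored counting: a bucket has size > 1 iff some other index shares the feature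
lemma count_anchor (l : List (Int × Int)) (hnd : (l.map Prod.fst).Nodup)
    (f : Int × Int → Int) (p : Int × Int) (hp : p ∈ l) :
    1 < (l.map f).count (f p) ↔ ∃ q ∈ l, q.1 ≠ p.1 ∧ f q = f p := by
  have hl : l.Nodup := hnd.of_map
  have hcnt : (l.map f).count (f p) = (l.filter (fun q => f q == f p)).length := by
    rw [List.count, List.countP_map, List.countP_eq_length_filter]; rfl
  rw [hcnt]
  have hpl : p ∈ l.filter (fun q => f q == f p) := List.mem_filter.mpr ⟨hp, by simp⟩
  have hnf : (l.filter (fun q => f q == f p)).Nodup := hl.filter _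
  constructor
  · intro h1
    obtain ⟨q, hq, hqp⟩ : ∃ q ∈ l.filter (fun q => f q == f p), q ≠ p := by
      rcases hh : l.filter (fun q => f q == f p) with _ | ⟨a, _ | ⟨b, t⟩⟩
      · rw [hh] at h1; simp at h1
      · rw [hh] at h1; simp at h1
      · rw [hh] at hnf hpl
        by_cases hap : a = p
        · refine ⟨b, by simp, fun hbp => ?_⟩
          subst hap hbp; simp at hnf
        · exact ⟨a, by simp, hap⟩
    have hql := (List.mem_filter.mp hq).1
    refine ⟨q, hql, fun h => hqp ?_, by simpa using (List.mem_filter.mp hq).2⟩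
    exact List.inj_on_of_nodup_map hnd hql hp h
  · rintro ⟨q, hql, hq1, hqf⟩
    have hqlf : q ∈ l.filter (fun q => f q == f p) := List.mem_filter.mpr ⟨hql, by simp [hqf]⟩
    have hqp : q ≠ p := fun h => hq1 (by rw [h])
    have hsub : [q, p].Subperm (l.filter (fun q => f q == f p)) := by
      refine List.subperm_of_subset (by simp [hqp]) ?_
      intro x hx
      simp only [List.mem_cons, List.not_mem_nil, or_false] at hx
      rcases hx with rfl | rfl
      · exact hqlf
      · exact hpl
    simpa using hsub.length_le

-- B's bucket condition, with the counters evaluated to list counts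
abbrev pvPred (board : List Int) (p : Int × Int) : Prop :=
  1 < (((PySem.List.enumerate board).map (fun q => q.2)).count p.2 : Int)
    ∨ 1 < (((PySem.List.enumerate board).map (fun q => q.2 - q.1)).count (p.2 - p.1) : Int)
    ∨ 1 < (((PySem.List.enumerate board).map (fun q => q.2 + q.1)).count (p.2 + p.1) : Int)

lemma alt_eq (board : List Int) :
    compute_conflicted_indices_alt board =
      ((PySem.List.enumerate board).filter (fun p => decide (pvPred board p))).map (fun p => p.1) := by
  simp only [compute_conflicted_indices_alt, pvCounter, PySem.Dict.getD_foldl_insert_add_one,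
    PySem.Dict.getD_empty, pvPred, zero_add, Bool.decide_or, Bool.or_assoc,
    PySem.List.map_snd_enumerate]

lemma pred_iff (board : List Int) (p : Int × Int) (hp : p ∈ PySem.List.enumerate board) :
    pvPred board p ↔ ∃ q ∈ PySem.List.enumerate board, q.1 ≠ p.1 ∧
      (q.2 = p.2 ∨ q.2 - q.1 = p.2 - p.1 ∨ q.2 + q.1 = p.2 + p.1) := by
  have h1 := count_anchor _ (nodup_fst_enumerate board) (fun q => q.2) p hp
  have h2 := count_anchor _ (nodup_fst_enumerate board) (fun q => q.2 - q.1) p hp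
  have h3 := count_anchor _ (nodup_fst_enumerate board) (fun q => q.2 + q.1) p hp
  simp only [pvPred, Nat.one_lt_cast, h1, h2, h3]
  constructor
  · rintro (⟨q, hq, hne, hf⟩ | ⟨q, hq, hne, hf⟩ | ⟨q, hq, hne, hf⟩)
    · exact ⟨q, hq, hne, Or.inl hf⟩
    · exact ⟨q, hq, hne, Or.inr (Or.inl hf)⟩
    · exact ⟨q, hq, hne, Or.inr (Or.inr hf)⟩
  · rintro ⟨q, hq, hne, hf | hf | hf⟩
    · exact Or.inl ⟨q, hq, hne, hf⟩
    · exact Or.inr (Or.inl ⟨q, hq, hne, hf⟩)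
    · exact Or.inr (Or.inr ⟨q, hq, hne, hf⟩)

-- the central membership equivalence: conflicted by some pair ⟺ in an over-full bucket
lemma mem_flat_iff_pred (board : List Int) (k : Int) :
    k ∈ pvFlat board ↔ ∃ p ∈ PySem.List.enumerate board, pvPred board p ∧ p.1 = k := by
  rw [mem_pvFlat]
  constructor
  · rintro ⟨i, j, h0, hij, hjn, hc, hk⟩
    have hpi : ((i : Int), board[i.toNat]'(by omega)) ∈ PySem.List.enumerate board := by
      rw [mem_enumerate_zero]; exact ⟨i.toNat, by omega, by simp; omega⟩
    have hpj : ((j : Int), board[j.toNat]'(by omega)) ∈ PySem.List.enumerate board := by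
      rw [mem_enumerate_zero]; exact ⟨j.toNat, by omega, by simp; omega⟩
    have hfeat := (cond_iff_features board _ _ hpi hpj).mp (by simpa using hc)
    rcases hk with rfl | rfl
    · refine ⟨_, hpi, ?_, rfl⟩
      rw [pred_iff board _ hpi]
      exact ⟨_, hpj, by simp; omega, hfeat⟩
    · refine ⟨_, hpj, ?_, rfl⟩
      rw [pred_iff board _ hpj]
      refine ⟨_, hpi, by simp; omega, ?_⟩
      simp only [] at hfeat ⊢; omega
  · rintro ⟨p, hp, hpred, rfl⟩
    obtain ⟨q, hq, hne, hfeat⟩ := (pred_iff board p hp).mp hpred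
    obtain ⟨a, ha, rfl⟩ := (mem_enumerate_zero board p).mp hp
    obtain ⟨b, hb, rfl⟩ := (mem_enumerate_zero board q).mp hq
    simp only [] at hne hfeat
    rcases lt_or_gt_of_ne hne with hlt | hlt
    · refine ⟨(b : Int), (a : Int), by omega, by omega, by omega, ?_, Or.inr rfl⟩
      exact (cond_iff_features board _ _ hq hp).mpr (by simp only []; omega)
    · refine ⟨(a : Int), (b : Int), by omega, by omega, by omega, ?_, Or.inl rfl⟩
      rw [show pvCond board (a:Int) (b:Int) ↔ _ from cond_iff_features board _ _ hp hq]
      simp only []; omega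

-- ===== VERDICT (by name: the statement is the Claim_ definition above) =====
theorem compute_conflicted_indices_spec : Claim_equal_compute_conflicted_indices := by
  intro board _
  unfold Spec_compute_conflicted_indices
  rw [alt_eq]
  have hpw : (((PySem.List.enumerate board).filter (fun p => decide (pvPred board p))).map
      (fun p => p.1)).Pairwise (fun a b => a < b) :=
    List.Pairwise.map _ (fun _ _ h => h)
      ((PySem.List.pairwise_lt_enumerate board 0).filter _)
  have hnd : (((PySem.List.enumerate board).filter (fun p => decide (pvPred board p))).map
      (fun p => p.1)).Nodup := hpw.imp (fun h => ne_of_lt h)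
  simp only [compute_conflicted_indices]
  rw [pvConflicts_eq]
  refine PySem.List.sorted_eq_of_perm_of_pairwise_lt _ _ _ ?_ hpw
  rw [List.perm_ext_iff_of_nodup hnd (PySem.Set.nodup_ofList _)]
  intro k
  rw [PySem.Set.mem_ofList, mem_flat_iff_pred]
  simp only [List.mem_map, List.mem_filter, decide_eq_true_eq]
  constructor
  · rintro ⟨p, ⟨hp, hpred⟩, hk⟩; exact ⟨p, hp, hpred, hk⟩
  · rintro ⟨p, hp, hpred, hk⟩; exact ⟨p, ⟨hp, hpred⟩, hk⟩
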